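-- pv_equiv track=rewrite | github.com/qkrckstjq/Baejoon-ProgrammersRepository | 백준/Gold/1081. 합/합.py | sum_of_digits_in_range
-- ===== SOURCE A (Python) =====
-- def sum_of_digits_in_range(L, U):
--     def sum_digits_to_n(n):
--         if n < 0:
--             return 0
--         total_sum = 0
--         factor = 1
--         while factor <= n:
--             lower_numbers = n % factor
--             current_digit = (n // factor) % 10
--             higher_numbers = n // (factor * 10)
--
--             # Add the sum for the current digit position
--             total_sum += higher_numbers * 45 * factor  # Sum for all digits 0-9 in the current position
--             total_sum += current_digit * (current_digit - 1) // 2 * factor  # Sum of digits less than current digit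
--             total_sum += current_digit * (lower_numbers + 1)  # Sum of digits exactly equal to current digit
--
--             factor *= 10
--
--         return total_sum
--
--     return sum_digits_to_n(U) - sum_digits_to_n(L - 1)
-- ===== SOURCE B (Python) =====
-- def sum_of_digits_in_range(L, U):
--     def digit_sum(m):
--         s = 0
--         while m > 0:
--             s += m % 10
--             m //= 10
--         return s
--
--     def f(n):
--         # sum of digit sums of 0..n, by recursion on the leading prefix n // 10:
--         # full blocks 10a..10a+9 for a < q contribute 10*f(q-1) + 45*q,
--         # the partial block 10q..10q+r contributes (r+1)*digit_sum(q) + r*(r+1)//2.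
--         if n < 0:
--             return 0
--         q = n // 10
--         r = n % 10
--         return 10 * f(q - 1) + 45 * q + (r + 1) * digit_sum(q) + r * (r + 1) // 2
--
--     return f(U) - f(L - 1)
-- ===== Notes on version B (the rewrite author's own statement) =====
-- stated objective: alternative
-- what changed: The inner prefix digit-sum helper is rewritten as a divide-by-10 recursion f(n)=10*f(n//10-1)+45*(n//10)+(n%10+1)*digit_sum(n//10)+tri(n%10) counting whole 10-blocks, instead of A's iterative loop over digit positions (factor=1,10,100,...) with a per-position closed-form contribution; the f(U)-f(L-1) outer subtraction is kept.
import Mathlib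
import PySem

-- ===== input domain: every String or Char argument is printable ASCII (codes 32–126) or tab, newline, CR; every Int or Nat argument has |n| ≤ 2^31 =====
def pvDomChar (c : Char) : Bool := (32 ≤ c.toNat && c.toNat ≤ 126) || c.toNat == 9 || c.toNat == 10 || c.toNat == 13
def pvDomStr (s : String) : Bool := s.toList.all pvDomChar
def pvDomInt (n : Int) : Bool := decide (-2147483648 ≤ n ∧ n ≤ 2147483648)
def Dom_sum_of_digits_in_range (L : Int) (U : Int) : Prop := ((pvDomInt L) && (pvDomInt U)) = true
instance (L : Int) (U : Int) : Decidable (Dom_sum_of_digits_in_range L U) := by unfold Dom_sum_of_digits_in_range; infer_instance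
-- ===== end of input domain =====

-- B replaces A's per-digit-position closed-form loop by a divide-by-10 recursion over whole
-- 10-blocks (an alternative algorithm of similar cost); the f(U) - f(L-1) outer form is kept.

-- ===== PORT A =====
-- the while-loop of sum_digits_to_n: state (total_sum, factor); the inner 'factor ≤ 0' branch is
-- only a totality guard (never taken from the initial call, where factor = 1 > 0)
def pvLoopA (n factor total : Int) : Int :=
  if _h1 : factor ≤ n then
    if _h2 : factor ≤ 0 then total
    else
      pvLoopA n (factor * 10)
        (total + PySem.Int.floordiv n (factor * 10) * 45 * factor
          + PySem.Int.floordiv (PySem.Int.mod (PySem.Int.floordiv n factor) 10 * (PySem.Int.mod (PySem.Int.floordiv n factor) 10 - 1)) 2 * factor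
          + PySem.Int.mod (PySem.Int.floordiv n factor) 10 * (PySem.Int.mod n factor + 1))
  else total
termination_by (n + 1 - factor).toNat
decreasing_by omega

def pvSumDigitsToN (n : Int) : Int := if n < 0 then 0 else pvLoopA n 1 0

def sum_of_digits_in_range (L : Int) (U : Int) : Int :=
  pvSumDigitsToN U - pvSumDigitsToN (L - 1)

-- ===== PORT B =====
-- digit_sum's while loop: state (m, s)
def pvDigitSumLoop (m s : Int) : Int :=
  if _h : 0 < m then pvDigitSumLoop (PySem.Int.floordiv m 10) (s + PySem.Int.mod m 10) else s
termination_by m.toNat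
decreasing_by
  rw [PySem.Int.floordiv_eq_ediv_of_pos (by norm_num)]; omega

-- f: recursion on the prefix n // 10 (q and r of Source B inlined)
def pvF (n : Int) : Int :=
  if n < 0 then 0
  else
    10 * pvF (PySem.Int.floordiv n 10 - 1) + 45 * PySem.Int.floordiv n 10
      + (PySem.Int.mod n 10 + 1) * pvDigitSumLoop (PySem.Int.floordiv n 10) 0
      + PySem.Int.floordiv (PySem.Int.mod n 10 * (PySem.Int.mod n 10 + 1)) 2
termination_by (n + 1).toNat
decreasing_by
  rw [PySem.Int.floordiv_eq_ediv_of_pos (by norm_num)]; omega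

def sum_of_digits_in_range_alt (L : Int) (U : Int) : Int :=
  pvF U - pvF (L - 1)

-- ===== PRECONDITION & SPEC =====
def Spec_sum_of_digits_in_range (L : Int) (U : Int) (out : Int) : Prop := out = sum_of_digits_in_range_alt L U
instance (L : Int) (U : Int) (out : Int) : Decidable (Spec_sum_of_digits_in_range L U out) := by unfold Spec_sum_of_digits_in_range; infer_instance

-- ===== CLAIM (what is proved, stated in full; the proofs are below) =====
def Claim_equal_sum_of_digits_in_range : Prop := ∀ (L : Int) (U : Int), Dom_sum_of_digits_in_range L U → Spec_sum_of_digits_in_range L U (sum_of_digits_in_range L U)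

-- ===== LEMMAS AND PROOFS =====

-- mathematical reference objects (proof-only)
-- digit sum of a natural number
def pvDs (n : Nat) : Nat := if n = 0 then 0 else n % 10 + pvDs (n / 10)
termination_by n
decreasing_by exact Nat.div_lt_self (by omega) (by norm_num)

-- prefix sum of digit sums: pvPS q = Σ_{a < q} ds a  (so "sum_digits_to_n n" = pvPS (n+1))
def pvPS (q : Nat) : Nat := ∑ a ∈ Finset.range q, pvDs a

-- the per-position contribution A's loop adds at position j (Nat form)
def pvContrib (n j : Nat) : Nat :=
  n / 10 ^ (j + 1) * 45 * 10 ^ j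
    + (n / 10 ^ j % 10) * (n / 10 ^ j % 10 - 1) / 2 * 10 ^ j
    + (n / 10 ^ j % 10) * (n % 10 ^ j + 1)

-- the remaining sum of A's loop from position j on
def pvTail (n j : Nat) : Nat :=
  if 10 ^ j ≤ n then pvContrib n j + pvTail n (j + 1) else 0
termination_by n - j
decreasing_by
  have : j < 10 ^ j := Nat.lt_pow_self (by norm_num)
  omega

-- cast helpers
lemma pvFdivCast (a : Nat) : PySem.Int.floordiv (a : Int) 10 = ((a / 10 : Nat) : Int) := by
  exact_mod_cast PySem.Int.floordiv_natCast a 10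

lemma pvModCast (a : Nat) : PySem.Int.mod (a : Int) 10 = ((a % 10 : Nat) : Int) := by
  exact_mod_cast PySem.Int.mod_natCast a 10

lemma pvTriCast (r : Nat) (h : r < 10) :
    PySem.Int.floordiv ((r : Int) * ((r : Int) + 1)) 2 = ((r * (r + 1) / 2 : Nat) : Int) := by
  interval_cases r <;> decide

lemma pvTriCast' (d : Nat) (h : d < 10) :
    PySem.Int.floordiv ((d : Int) * ((d : Int) - 1)) 2 = ((d * (d - 1) / 2 : Nat) : Int) := by
  interval_cases d <;> decide

-- B's digit_sum loop computes pvDs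
lemma pvDs_zero : pvDs 0 = 0 := by rw [pvDs]; simp

lemma pvDigitSumLoop_eq : ∀ (m : Nat) (s : Int), pvDigitSumLoop (m : Int) s = s + (pvDs m : Int) := by
  intro m
  induction m using Nat.strong_induction_on with
  | _ m ih =>
    intro s
    rw [pvDigitSumLoop, pvDs]
    by_cases h : m = 0
    · subst h; norm_num
    · have hm : (0 : Int) < (m : Int) := by exact_mod_cast Nat.pos_of_ne_zero h
      rw [dif_pos hm, if_neg h, pvFdivCast, pvModCast,
        ih (m / 10) (Nat.div_lt_self (Nat.pos_of_ne_zero h) (by norm_num))]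
      push_cast; ring

-- digits lemma: ds (10q + i) = ds q + i for i < 10
lemma pvDs_mul_add (q i : Nat) (h : i < 10) : pvDs (10 * q + i) = pvDs q + i := by
  rw [pvDs]
  by_cases hq : 10 * q + i = 0
  · have hq0 : q = 0 := by omega
    have hi0 : i = 0 := by omega
    rw [if_pos hq, hq0, hi0, pvDs_zero]
  · rw [if_neg hq]
    have h1 : (10 * q + i) % 10 = i := by omega
    have h2 : (10 * q + i) / 10 = q := by omega
    rw [h1, h2]; omega

-- Σ_{k < 10q} ds k = 10 · PS q + 45 q
lemma pvSum_blocks : ∀ q : Nat, (∑ k ∈ Finset.range (10 * q), pvDs k) = 10 * pvPS q + 45 * q := by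
  intro q
  induction q with
  | zero => simp [pvPS]
  | succ q ih =>
    rw [show 10 * (q + 1) = 10 * q + 10 by ring, Finset.sum_range_add, ih]
    have hc : ∑ i ∈ Finset.range 10, pvDs (10 * q + i) = ∑ i ∈ Finset.range 10, (pvDs q + i) :=
      Finset.sum_congr rfl (fun i hi => pvDs_mul_add q i (Finset.mem_range.mp hi))
    rw [hc, Finset.sum_add_distrib, Finset.sum_const, show ∑ i ∈ Finset.range 10, i = 45 by decide,
      show pvPS (q + 1) = pvPS q + pvDs q from Finset.sum_range_succ _ _]
    simp; ring

-- block recurrence for the prefix sum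
lemma pvPS_rec (q r : Nat) (h : r < 10) :
    pvPS (10 * q + r + 1) = 10 * pvPS q + 45 * q + (r + 1) * pvDs q + r * (r + 1) / 2 := by
  have hgauss : (∑ i ∈ Finset.range (r + 1), i) = r * (r + 1) / 2 := by
    have h2 := Finset.sum_range_id_mul_two (r + 1)
    rw [show (r + 1) * (r + 1 - 1) = r * (r + 1) by rw [Nat.add_sub_cancel]; ring] at h2
    omega
  rw [show 10 * q + r + 1 = 10 * q + (r + 1) by ring, pvPS, Finset.sum_range_add,
    show (∑ k ∈ Finset.range (10 * q), pvDs k) = 10 * pvPS q + 45 * q from pvSum_blocks q]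
  have hc : ∑ i ∈ Finset.range (r + 1), pvDs (10 * q + i) = ∑ i ∈ Finset.range (r + 1), (pvDs q + i) :=
    Finset.sum_congr rfl (fun i hi => pvDs_mul_add q i (by have := Finset.mem_range.mp hi; omega))
  rw [hc, Finset.sum_add_distrib, Finset.sum_const, hgauss]
  simp; ring

-- B's f computes the prefix sum
lemma pvF_eq : ∀ n : Nat, pvF (n : Int) = (pvPS (n + 1) : Int) := by
  intro n
  induction n using Nat.strong_induction_on with
  | _ n ih =>
    rw [pvF, if_neg (by omega), pvFdivCast, pvModCast,
      pvDigitSumLoop_eq (n / 10) 0, pvTriCast (n % 10) (by omega)]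
    have hfq : pvF (((n / 10 : Nat) : Int) - 1) = ((pvPS (n / 10) : Nat) : Int) := by
      by_cases hq : n / 10 = 0
      · rw [hq, show ((0 : Nat) : Int) - 1 = -1 by norm_num, pvF]
        norm_num [pvPS]
      · rw [show ((n / 10 : Nat) : Int) - 1 = ((n / 10 - 1 : Nat) : Int) by omega,
          ih (n / 10 - 1) (by omega)]
        congr 2
        omega
    rw [hfq, show n + 1 = 10 * (n / 10) + n % 10 + 1 by omega,
      pvPS_rec (n / 10) (n % 10) (by omega)]
    push_cast
    ring

-- A's loop computes pvTail
lemma pvLoopA_eq : ∀ (k n j : Nat) (t : Int), n - j ≤ k →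
    pvLoopA (n : Int) ((10 ^ j : Nat) : Int) t = t + (pvTail n j : Int) := by
  intro k
  induction k with
  | zero =>
    intro n j t hk
    have hj : j < 10 ^ j := Nat.lt_pow_self (by norm_num)
    rw [pvLoopA, pvTail, dif_neg (by exact_mod_cast (by omega : ¬ (10 ^ j ≤ n))), if_neg (by omega)]
    norm_num
  | succ k ih =>
    intro n j t hk
    have hj : j < 10 ^ j := Nat.lt_pow_self (by norm_num)
    rw [pvLoopA, pvTail]
    by_cases h : 10 ^ j ≤ n
    · have hfac : ((10 ^ j : Nat) : Int) ≤ (n : Int) := by exact_mod_cast h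
      have hpos : (0 : Int) < ((10 ^ j : Nat) : Int) := by exact_mod_cast Nat.pow_pos (a := 10) (by norm_num)
      rw [dif_pos hfac, dif_neg (by omega), if_pos h,
        show ((10 ^ j : Nat) : Int) * 10 = ((10 ^ (j + 1) : Nat) : Int) by push_cast; ring,
        PySem.Int.floordiv_natCast n (10 ^ (j + 1)), PySem.Int.floordiv_natCast n (10 ^ j),
        PySem.Int.mod_natCast n (10 ^ j), pvModCast (n / 10 ^ j),
        pvTriCast' (n / 10 ^ j % 10) (by omega),
        ih n (j + 1) _ (by omega)]
      rw [pvContrib]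
      push_cast
      ring
    · rw [dif_neg (by exact_mod_cast h), if_neg h]
      norm_num

-- contribution shift: position j+1 of 10q+r versus position j of q
lemma pvContrib_shift (q r j : Nat) (h : r < 10) :
    ((pvContrib (10 * q + r) (j + 1) : Nat) : Int)
      = 10 * (pvContrib q j : Int) + ((q / 10 ^ j % 10 : Nat) : Int) * ((r : Int) - 9) := by
  have hp : 0 < 10 ^ j := Nat.pow_pos (a := 10) (by norm_num)
  have hd10 : (10 * q + r) / 10 = q := by omega
  have ha : (10 * q + r) / 10 ^ (j + 2) = q / 10 ^ (j + 1) := by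
    rw [show (10 : Nat) ^ (j + 2) = 10 * 10 ^ (j + 1) by ring, ← Nat.div_div_eq_div_mul, hd10]
  have hb : (10 * q + r) / 10 ^ (j + 1) = q / 10 ^ j := by
    rw [show (10 : Nat) ^ (j + 1) = 10 * 10 ^ j by ring, ← Nat.div_div_eq_div_mul, hd10]
  have hc : (10 * q + r) % 10 ^ (j + 1) = 10 * (q % 10 ^ j) + r := by
    have hq := Nat.div_add_mod q (10 ^ j)
    have hmlt : q % 10 ^ j < 10 ^ j := Nat.mod_lt q hp
    have e0 : 10 * 10 ^ j * (q / 10 ^ j) = 10 * (10 ^ j * (q / 10 ^ j)) := by ring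
    have e1 : 10 * q + r = (10 * (q % 10 ^ j) + r) + 10 * 10 ^ j * (q / 10 ^ j) := by omega
    rw [show (10 : Nat) ^ (j + 1) = 10 * 10 ^ j by ring, e1, Nat.add_mul_mod_self_left,
      Nat.mod_eq_of_lt (by omega)]
  rw [pvContrib, pvContrib, ha, hb, hc]
  push_cast [pow_succ]
  ring

-- tail telescoping: the no-more-digits case, shared by base and step
lemma pvTail_shift_base (q r j : Nat) (hr : r < 10) (h : ¬ 10 ^ j ≤ q) :
    ((pvTail (10 * q + r) (j + 1) : Nat) : Int)
      = 10 * (pvTail q j : Int) + ((r : Int) - 9) * (pvDs (q / 10 ^ j) : Int) := by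
  have hq : q / 10 ^ j = 0 := Nat.div_eq_of_lt (by omega)
  rw [pvTail, if_neg (by rw [show (10 : Nat) ^ (j + 1) = 10 * 10 ^ j by ring]; omega),
    pvTail, if_neg h, hq, pvDs_zero]
  norm_num

-- tail telescoping
lemma pvTail_shift : ∀ (k q r j : Nat), q - j ≤ k → r < 10 →
    ((pvTail (10 * q + r) (j + 1) : Nat) : Int)
      = 10 * (pvTail q j : Int) + ((r : Int) - 9) * (pvDs (q / 10 ^ j) : Int) := by
  intro k
  induction k with
  | zero =>
    intro q r j hk hr
    have hj : j < 10 ^ j := Nat.lt_pow_self (by norm_num)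
    have h : ¬ 10 ^ j ≤ q := by omega
    exact pvTail_shift_base q r j hr h
  | succ k ih =>
    intro q r j hk hr
    have hj : j < 10 ^ j := Nat.lt_pow_self (by norm_num)
    by_cases h : 10 ^ j ≤ q
    · have hL : pvTail (10 * q + r) (j + 1) = pvContrib (10 * q + r) (j + 1) + pvTail (10 * q + r) (j + 2) := by
        rw [pvTail, if_pos (by rw [show (10 : Nat) ^ (j + 1) = 10 * 10 ^ j by ring]; omega)]
      have hR : pvTail q j = pvContrib q j + pvTail q (j + 1) := by
        rw [pvTail, if_pos h]
      have hds : pvDs (q / 10 ^ j) = q / 10 ^ j % 10 + pvDs (q / 10 ^ (j + 1)) := by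
        rw [pvDs, if_neg (by have := Nat.one_le_div_iff (Nat.pow_pos (a := 10) (by norm_num)) |>.mpr h; omega),
          Nat.div_div_eq_div_mul, show 10 ^ j * 10 = 10 ^ (j + 1) by ring]
      rw [hL, hR, hds]
      have := ih q r (j + 1) (by omega) hr
      push_cast [pvContrib_shift q r j hr, this]
      ring
    · exact pvTail_shift_base q r j hr h

-- A's tail from position 0 equals the prefix sum
lemma pvTail_eq_PS : ∀ n : Nat, (pvTail n 0 : Int) = (pvPS (n + 1) : Int) := by
  intro n
  induction n using Nat.strong_induction_on with
  | _ n ih =>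
    by_cases hn : n = 0
    · subst hn; rw [pvTail]; norm_num [pvPS, pvDs_zero]
    · have h1 : pvTail n 0 = pvContrib n 0 + pvTail n 1 := by
        rw [pvTail, if_pos (by simpa using Nat.one_le_iff_ne_zero.mpr hn)]
      have hshift := pvTail_shift (n / 10) (n / 10) (n % 10) 0 (by omega) (by omega)
      rw [show 10 * (n / 10) + n % 10 = n by omega] at hshift
      simp only [pow_zero, Nat.div_one, zero_add] at hshift
      have hIH : (pvTail (n / 10) 0 : Int) = (pvPS (n / 10 + 1) : Int) := ih (n / 10) (by omega)
      have hPSq : pvPS (n / 10 + 1) = pvPS (n / 10) + pvDs (n / 10) := Finset.sum_range_succ _ _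
      obtain ⟨r, hr, hrn⟩ : ∃ r, r < 10 ∧ n % 10 = r := ⟨n % 10, by omega, rfl⟩
      rw [hrn] at hshift
      rw [show n + 1 = 10 * (n / 10) + r + 1 by omega, pvPS_rec (n / 10) r (by omega), h1,
        Nat.cast_add, hshift, hIH, hPSq, pvContrib]
      simp only [pow_zero, Nat.div_one, Nat.mod_one, hrn]
      interval_cases r <;> push_cast <;> omega

lemma pvAB_eq (z : Int) : pvSumDigitsToN z = pvF z := by
  by_cases hz : z < 0
  · rw [pvSumDigitsToN, pvF]
    simp [hz]
  · have hz' : z = (z.toNat : Int) := (Int.toNat_of_nonneg (by omega)).symm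
    rw [hz', pvSumDigitsToN, if_neg (by omega),
      show (1 : Int) = ((10 ^ 0 : Nat) : Int) by norm_num,
      pvLoopA_eq z.toNat z.toNat 0 0 (by omega), pvTail_eq_PS, pvF_eq]
    norm_num

-- ===== VERDICT (by name: the statement is the Claim_ definition above) =====
theorem sum_of_digits_in_range_spec : Claim_equal_sum_of_digits_in_range := by
  intro L U _
  unfold Spec_sum_of_digits_in_range sum_of_digits_in_range sum_of_digits_in_range_alt
  rw [pvAB_eq, pvAB_eq]
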